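-- pv_equiv track=rewrite | github.com/PiotrMatolicz/WW | dzien_5/policz_znaki.py | policz_znaki
-- ===== SOURCE A (Python) =====
-- def policz_znaki(napis, zp='<', zk='>'):
--     poziom = 0
--     liczba_znakow = 0
--     for litera in napis:
--         if litera == '<':
--             poziom += 1
--         elif litera == '>':
--             poziom -= 1
--         else:
--             liczba_znakow += poziom
--     return liczba_znakow
-- ===== SOURCE B (Python) =====
-- def policz_znaki(napis, zp='<', zk='>'):
--     # pass 1: count all plain (non-bracket) characters
--     pozostale = sum(1 for c in napis if c != '<' and c != '>')
--     # pass 2: each '<' adds, each '>' subtracts, the number of plain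
--     # characters strictly to its right; pozostale tracks that number
--     wynik = 0
--     for c in napis:
--         if c == '<':
--             wynik += pozostale
--         elif c == '>':
--             wynik -= pozostale
--         else:
--             pozostale -= 1
--     return wynik
-- ===== Notes on version B (the rewrite author's own statement) =====
-- stated objective: alternative
-- what changed: Replaces the running nesting-level accumulation with a two-pass scheme: first count all plain characters, then credit each '<' (debit each '>') with the number of plain characters remaining to its right.
import Mathlib
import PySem

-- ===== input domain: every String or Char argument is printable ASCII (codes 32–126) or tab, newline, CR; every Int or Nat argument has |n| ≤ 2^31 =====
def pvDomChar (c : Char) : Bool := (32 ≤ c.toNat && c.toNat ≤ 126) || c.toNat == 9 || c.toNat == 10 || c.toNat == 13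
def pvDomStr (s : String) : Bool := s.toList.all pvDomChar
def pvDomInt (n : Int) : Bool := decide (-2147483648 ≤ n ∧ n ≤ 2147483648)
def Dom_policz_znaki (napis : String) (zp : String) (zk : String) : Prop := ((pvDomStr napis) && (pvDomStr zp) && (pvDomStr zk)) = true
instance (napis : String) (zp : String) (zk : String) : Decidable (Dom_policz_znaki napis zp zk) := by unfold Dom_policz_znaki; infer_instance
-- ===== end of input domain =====

-- B replaces A's running nesting level with two staged passes: count the plain characters, then pay each bracket the plain count to its right (alternative decomposition, same cost).
-- ===== PORT A =====
-- state = (poziom, liczba_znakow), left-to-right over napis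
def policz_znaki (napis : String) (zp : String) (zk : String) : Int :=
  (napis.toList.foldl
    (fun (s : Int × Int) litera =>
      if litera = '<' then (s.1 + 1, s.2)
      else if litera = '>' then (s.1 - 1, s.2)
      else (s.1, s.2 + s.1))
    (0, 0)).2

-- ===== PORT B =====
-- pass 2 of B: explicit recursion over the characters carrying (pozostale, wynik)
def pvGoB : List Char → Int → Int → Int
  | [], _, wynik => wynik
  | c :: tl, pozostale, wynik =>
    if c = '<' then pvGoB tl pozostale (wynik + pozostale)
    else if c = '>' then pvGoB tl pozostale (wynik - pozostale)
    else pvGoB tl (pozostale - 1) wynik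

def policz_znaki_alt (napis : String) (zp : String) (zk : String) : Int :=
  pvGoB napis.toList
    ((napis.toList.countP (fun c => !(c = '<' || c = '>')) : Nat) : Int) 0

-- ===== PRECONDITION & SPEC =====
def Spec_policz_znaki (napis : String) (zp : String) (zk : String) (out : Int) : Prop := out = policz_znaki_alt napis zp zk
instance (napis : String) (zp : String) (zk : String) (out : Int) : Decidable (Spec_policz_znaki napis zp zk out) := by unfold Spec_policz_znaki; infer_instance

-- ===== CLAIM (what is proved, stated in full; the proofs are below) =====
def Claim_equal_policz_znaki : Prop := ∀ (napis : String) (zp : String) (zk : String), Dom_policz_znaki napis zp zk → Spec_policz_znaki napis zp zk (policz_znaki napis zp zk)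

-- ===== LEMMAS AND PROOFS =====

def pvStepA (s : Int × Int) (litera : Char) : Int × Int :=
  if litera = '<' then (s.1 + 1, s.2)
  else if litera = '>' then (s.1 - 1, s.2)
  else (s.1, s.2 + s.1)

-- number of plain (non-bracket) characters, as an Int
def pvPlain (l : List Char) : Int :=
  ((l.countP (fun c => !(c = '<' || c = '>')) : Nat) : Int)

lemma pvPlain_cons (c : Char) (tl : List Char) :
    pvPlain (c :: tl) = if c = '<' then pvPlain tl else if c = '>' then pvPlain tl else pvPlain tl + 1 := by
  by_cases h1 : c = '<'
  · simp [pvPlain, h1]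
  · by_cases h2 : c = '>'
    · simp [pvPlain, h2]
    · simp [pvPlain, h1, h2]

-- the accumulator of pvGoB is additive
lemma pvGoB_acc (l : List Char) (x w : Int) :
    pvGoB l x w = w + pvGoB l x 0 := by
  induction l generalizing x w with
  | nil => simp [pvGoB]
  | cons c tl ih =>
    by_cases h1 : c = '<'
    · simp only [pvGoB, h1, if_pos]
      rw [ih x (w + x), ih x (0 + x)]; ring
    · by_cases h2 : c = '>'
      · subst h2
        rw [show pvGoB ('>' :: tl) x w = pvGoB tl x (w - x) from by simp [pvGoB],
            show pvGoB ('>' :: tl) x 0 = pvGoB tl x (0 - x) from by simp [pvGoB],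
            ih x (w - x), ih x (0 - x)]; ring
      · simp only [pvGoB, h1, h2, reduceIte]
        exact ih _ _

-- Key invariant: A's fold from state (p, t) equals t + p·plain(l) + B's pass-2 run on l.
lemma pvA_inv (l : List Char) (p t : Int) :
    (l.foldl pvStepA (p, t)).2 = t + p * pvPlain l + pvGoB l (pvPlain l) 0 := by
  induction l generalizing p t with
  | nil => simp [pvPlain, pvGoB]
  | cons c tl ih =>
    by_cases h1 : c = '<'
    · subst h1
      simp only [List.foldl_cons, pvStepA, reduceIte, ih, pvPlain_cons, pvGoB]
      rw [pvGoB_acc tl (pvPlain tl) (0 + pvPlain tl)]; ring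
    · by_cases h2 : c = '>'
      · subst h2
        simp only [List.foldl_cons, pvStepA, h1, reduceIte, ih, pvPlain_cons, pvGoB]
        rw [pvGoB_acc tl (pvPlain tl) (0 - pvPlain tl)]; ring
      · simp only [List.foldl_cons, pvStepA, h1, h2, reduceIte, ih, pvPlain_cons, pvGoB]
        ring

-- ===== VERDICT (by name: the statement is the Claim_ definition above) =====
theorem policz_znaki_spec : Claim_equal_policz_znaki := by
  intro napis zp zk _
  unfold Spec_policz_znaki policz_znaki policz_znaki_alt
  rw [show (fun (s : Int × Int) litera =>
      if litera = '<' then (s.1 + 1, s.2)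
      else if litera = '>' then (s.1 - 1, s.2)
      else (s.1, s.2 + s.1)) = pvStepA from rfl]
  rw [pvA_inv]
  simp [pvPlain]
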